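-- pv_equiv track=rewrite | github.com/biscayan/Python_algorithm | This_is_codingtest/DFS_BFS/괄호변환.py | divide_str
-- ===== SOURCE A (Python) =====
-- def divide_str(input_str):
--
--     left_cnt, right_cnt = 0, 0
--
--     for i in range(len(input_str)):
--         if input_str[i] == '(':
--             left_cnt += 1
--         else:
--             right_cnt += 1
--
--         if left_cnt == right_cnt:
--             u = input_str[:i+1]
--             v = input_str[i+1:]
--
--             return u, v
-- ===== SOURCE B (Python) =====
-- def divide_str(input_str):
--     # Divide and conquer: first_hit(lo, hi, start) returns (i, end_balance) where i is
--     # the first index in [lo, hi) at which start + (balance delta of input_str[lo..i])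
--     # becomes 0 (or None), recursing on the two halves of the segment; the left half's
--     # end balance is the right half's start. The split point is that first zero.
--     deltas = [1 if c == '(' else -1 for c in input_str]
--
--     def first_hit(lo, hi, start):
--         if hi - lo == 1:
--             b = start + deltas[lo]
--             return (lo if b == 0 else None), b
--         mid = (lo + hi) // 2
--         il, bl = first_hit(lo, mid, start)
--         if il is not None:
--             return il, bl
--         return first_hit(mid, hi, bl)
--
--     if not input_str:
--         return None
--     i, _ = first_hit(0, len(input_str), 0)
--     if i is None:
--         return None
--     return input_str[:i + 1], input_str[i + 1:]
-- ===== Notes on version B (the rewrite author's own statement) =====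
-- stated objective: alternative
-- what changed: Replaces A's left-to-right counter scan with a divide-and-conquer search: map chars to +1/-1 deltas once, then recursively halve the segment, searching the left half first and threading its end balance into the right half to locate the first zero-balance prefix.
import Mathlib
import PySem

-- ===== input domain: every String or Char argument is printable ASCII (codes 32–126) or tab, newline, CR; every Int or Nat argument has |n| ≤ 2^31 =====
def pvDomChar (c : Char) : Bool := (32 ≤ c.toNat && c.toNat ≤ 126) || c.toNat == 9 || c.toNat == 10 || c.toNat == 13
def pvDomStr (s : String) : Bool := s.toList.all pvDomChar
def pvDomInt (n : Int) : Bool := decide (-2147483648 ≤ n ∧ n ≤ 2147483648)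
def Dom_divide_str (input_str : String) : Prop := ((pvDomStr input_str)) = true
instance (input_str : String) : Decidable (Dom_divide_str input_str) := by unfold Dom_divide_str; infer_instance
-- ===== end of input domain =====

-- B replaces A's left-to-right counter scan with a divide-and-conquer search over a
-- precomputed +1/-1 delta table; same O(n-ish) cost, different algorithm ("alternative").

-- ===== PORT A =====
-- A's index loop with two counters; the nonnegative slices are exact as take/drop.
-- Python falls off the loop (returns None, not a pair) when the counters never meet:
-- that case is excluded by Pre_ and ("","") stands in.
def divideAAux (full : List Char) : List Char → Nat → Int → Int → String × String
  | [], _, _, _ => ("", "")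
  | c :: rest, i, left, right =>
    let left' := if c = '(' then left + 1 else left
    let right' := if c = '(' then right else right + 1
    if left' = right' then
      (String.ofList (full.take (i+1)), String.ofList (full.drop (i+1)))
    else
      divideAAux full rest (i+1) left' right'

def divide_str (input_str : String) : String × String :=
  divideAAux input_str.toList input_str.toList 0 0 0

-- ===== PORT B =====
-- Source B's first_hit(lo, hi, start): the Python's lo/hi index window into `deltas` is
-- ported as the sublist ds = deltas[lo:hi], with the window offset added back onto the
-- relative index via `.map (· + m)`; mid = (lo+hi)//2 makes the left half of size
-- (hi-lo)/2, i.e. ds.length / 2. Returns (first index hitting balance 0, end balance).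
def firstHit (ds : List Int) (b : Int) : Option Nat × Int :=
  if h1 : ds.length < 2 then
    -- base case `hi - lo == 1`: one delta ds = [d] (ds = [] is unreachable from divide_str_alt)
    match ds with
    | [] => (none, b)
    | d :: _ => ((if b + d = 0 then some (0 : Nat) else none), b + d)
  else
    let m := ds.length / 2
    match firstHit (ds.take m) b with
    | (some i, bl) => (some i, bl)
    | (none, bl) =>
      let r := firstHit (ds.drop m) bl
      (r.1.map (· + m), r.2)
termination_by ds.length
decreasing_by
  · simp [List.length_take]; omega
  · simp [List.length_drop]; omega

-- the `if not input_str: return None` / `if i is None: return None` branches return no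
-- pair; they are excluded by Pre_ and ("","") stands in.
def divide_str_alt (input_str : String) : String × String :=
  let deltas := input_str.toList.map (fun c => if c = '(' then (1 : Int) else -1)
  if input_str.toList = [] then ("", "")
  else
    match (firstHit deltas 0).1 with
    | some i => (String.ofList (input_str.toList.take (i+1)), String.ofList (input_str.toList.drop (i+1)))
    | none => ("", "")

-- ===== PRECONDITION & SPEC =====
-- Pre_ excludes exactly the inputs on which A returns None instead of a pair (no prefix
-- has a running balance of zero, counting opening parens as +1 and every other character
-- as -1); B also returns None there.
def Pre_divide_str (input_str : String) : Prop :=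
  ∃ i < input_str.toList.length, (input_str.toList.take (i+1)).count '(' * 2 = i + 1
instance (input_str : String) : Decidable (Pre_divide_str input_str) := by
  unfold Pre_divide_str; infer_instance

def pvWitness_divide_str : String := "(())()"

def Spec_divide_str (input_str : String) (out : String × String) : Prop := out = divide_str_alt input_str
instance (input_str : String) (out : String × String) : Decidable (Spec_divide_str input_str out) := by unfold Spec_divide_str; infer_instance

-- ===== CLAIM (what is proved, stated in full; the proofs are below) =====
def Claim_equal_divide_str : Prop := ∀ (input_str : String), Dom_divide_str input_str → Pre_divide_str input_str → Spec_divide_str input_str (divide_str input_str)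

-- ===== LEMMAS AND PROOFS =====

-- first index (from the current position) at which the running balance, started at b, hits 0
def firstZero : List Char → Int → Option Nat
  | [], _ => none
  | c :: rest, b =>
    let b' := b + (if c = '(' then 1 else -1)
    if b' = 0 then some 0 else (firstZero rest b').map (· + 1)

-- the same first-zero search, linearly, over a delta list
def firstLin : List Int → Int → Option Nat
  | [], _ => none
  | d :: rest, b =>
    let b' := b + d
    if b' = 0 then some 0 else (firstLin rest b').map (· + 1)

theorem divideAAux_eq_firstZero (full : List Char) (cs : List Char) :
    ∀ (i : Nat) (l r : Int),
      divideAAux full cs i l r =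
        match firstZero cs (l - r) with
        | some k => (String.ofList (full.take (i+k+1)), String.ofList (full.drop (i+k+1)))
        | none => ("", "") := by
  induction cs with
  | nil => intro i l r; simp [divideAAux, firstZero]
  | cons c rest ih =>
    intro i l r
    simp only [divideAAux, firstZero]
    have key : ((if c = '(' then l + 1 else l) = (if c = '(' then r else r + 1)) ↔
        (l - r + (if c = '(' then 1 else -1) = 0) := by
      split_ifs <;> omega
    have harg : (if c = '(' then l + 1 else l) - (if c = '(' then r else r + 1) =
        l - r + (if c = '(' then 1 else -1) := by
      split_ifs <;> ring
    by_cases hz : l - r + (if c = '(' then 1 else -1) = 0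
    · rw [if_pos (key.mpr hz), if_pos hz]
    · rw [if_neg (fun h => hz (key.mp h)), if_neg hz, ih, harg]
      cases h : firstZero rest (l - r + (if c = '(' then 1 else -1)) with
      | none => simp
      | some k => simp [show i + 1 + k + 1 = i + (k + 1) + 1 by omega]

theorem firstLin_map (cs : List Char) :
    ∀ (b : Int), firstLin (cs.map fun c => if c = '(' then (1 : Int) else -1) b = firstZero cs b := by
  induction cs with
  | nil => intro b; simp [firstLin, firstZero]
  | cons c rest ih =>
    intro b
    simp only [List.map_cons, firstLin, firstZero, ih]

theorem firstLin_append (xs ys : List Int) :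
    ∀ (b : Int),
      firstLin (xs ++ ys) b =
        match firstLin xs b with
        | some i => some i
        | none => (firstLin ys (b + xs.sum)).map (· + xs.length) := by
  induction xs with
  | nil => intro b; cases h : firstLin ys b <;> simp [firstLin, h]
  | cons d rest ih =>
    intro b
    simp only [List.cons_append, firstLin]
    by_cases hz : b + d = 0
    · simp [hz]
    · rw [if_neg hz, if_neg hz, ih]
      cases h : firstLin rest (b + d) with
      | some i => simp
      | none =>
        cases h2 : firstLin ys (b + d + rest.sum) with
        | none => simp [← add_assoc, h2]
        | some j => simp [← add_assoc, h2]

theorem firstHit_spec (ds : List Int) (b : Int) :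
    (firstHit ds b).1 = firstLin ds b ∧ (firstLin ds b = none → (firstHit ds b).2 = b + ds.sum) := by
  fun_induction firstHit ds b
  case case1 => simp_all [firstLin]
  case case2 =>
    rename_i b d tail h1 h2
    cases tail with
    | nil => by_cases hz : b + d = 0 <;> simp [firstLin, hz]
    | cons _ _ => simp at h2
  case case3 b h1 m i bl heq ih =>
    rename_i ds
    have htake : firstLin (List.take m ds) b = some i := by
      rw [heq] at ih; exact ih.1.symm
    constructor
    · conv_rhs => rw [← List.take_append_drop m ds]
      rw [firstLin_append, htake]
    · intro h
      rw [← List.take_append_drop m ds, firstLin_append, htake] at h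
      simp at h
  case case4 b h1 m bl heq r ih2 ih1 =>
    rename_i ds
    have hm : (List.take m ds).length = m := by
      simp [List.length_take]; omega
    have htake : firstLin (List.take m ds) b = none := by
      rw [heq] at ih2; exact ih2.1.symm
    have hbl : bl = b + (List.take m ds).sum := by
      rw [heq] at ih2; exact (ih2.2 htake)
    constructor
    · show ((firstHit (List.drop m ds) bl).1.map (· + m)) = firstLin ds b
      conv_rhs => rw [← List.take_append_drop m ds]
      rw [firstLin_append, htake, ih1.1, hm, ← hbl]
    · intro h
      rw [← List.take_append_drop m ds, firstLin_append, htake] at h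
      simp only [Option.map_eq_none_iff] at h
      have hnone : firstLin (List.drop m ds) bl = none := by rw [hbl]; exact h
      show (firstHit (List.drop m ds) bl).2 = b + ds.sum
      rw [ih1.2 hnone, hbl, add_assoc, ← List.sum_append, List.take_append_drop]


-- prefix-count characterization of firstZero being defined
theorem firstZero_isSome_iff (cs : List Char) :
    ∀ (b : Int),
      (firstZero cs b).isSome ↔
        ∃ i < cs.length, b + ((cs.take (i+1)).count '(' * 2 - (i + 1)) = 0 := by
  induction cs with
  | nil => intro b; simp [firstZero]
  | cons c rest ih =>
    intro b
    simp only [firstZero]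
    have hcnt : ∀ (l : List Char), ((c :: l).count '(' : Int) =
        (l.count '(' : Int) + (if c = '(' then 1 else 0) := by
      intro l
      by_cases hc : c = '(' <;> simp [hc]
    by_cases hz : b + (if c = '(' then 1 else -1) = 0
    · rw [if_pos hz]
      constructor
      · intro _
        refine ⟨0, by simp, ?_⟩
        have := hcnt []
        simp only [List.take_succ_cons, List.take_zero] at *
        by_cases hc : c = '(' <;> simp [hc] at this hz ⊢ <;> omega
      · intro _; simp
    · rw [if_neg hz]
      simp only [Option.isSome_map]
      rw [ih]
      constructor
      · rintro ⟨i, hi, h⟩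
        refine ⟨i + 1, by simp; omega, ?_⟩
        rw [List.take_succ_cons, hcnt]
        have : ((c :: rest).length : Int) = rest.length + 1 := by simp
        split_ifs at h hz ⊢ <;> push_cast at h ⊢ <;> omega
      · rintro ⟨i, hi, h⟩
        match i with
        | 0 =>
          exfalso
          rw [List.take_succ_cons, List.take_zero, hcnt] at h
          split_ifs at h hz <;> simp at h <;> omega
        | Nat.succ j =>
          have hj : j < rest.length := by simp at hi; omega
          refine ⟨j, hj, ?_⟩
          rw [List.take_succ_cons, hcnt] at h
          split_ifs at h hz ⊢ <;> push_cast at h ⊢ <;> omega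

-- ===== VERDICT (by name: the statement is the Claim_ definition above) =====
theorem divide_str_spec : Claim_equal_divide_str := by
  intro s _ hpre
  unfold Spec_divide_str divide_str divide_str_alt
  rw [divideAAux_eq_firstZero]
  have hne : s.toList ≠ [] := by
    obtain ⟨i, hi, _⟩ := hpre
    intro h; rw [h] at hi; simp at hi
  rw [if_neg hne, (firstHit_spec _ _).1, firstLin_map]
  have hsome : (firstZero s.toList 0).isSome := by
    rw [firstZero_isSome_iff]
    obtain ⟨i, hi, hcnt⟩ := hpre
    exact ⟨i, hi, by omega⟩
  cases h : firstZero s.toList 0 with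
  | none => rw [h] at hsome; simp at hsome
  | some k => simp [h]
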